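-- pv_equiv track=rewrite | github.com/MiladShahidi/AX3-Sleep-Wake | sleep_wake_filters.py | filter_square_wave2
-- ===== SOURCE A (Python) =====
-- def filter_square_wave2 (square_wave):
--     filtered_wave = square_wave.copy()
--     consecutive_ones = 0
--     for i, val in enumerate(square_wave):
--         if val == 0:
--             if consecutive_ones > 0 and consecutive_ones < 20:
--                 for j in range(i - consecutive_ones, i):
--                     filtered_wave[j] = 0
--             consecutive_ones = 0
--         else:
--             consecutive_ones += 1
--     if consecutive_ones > 0 and consecutive_ones < 20:
--         for j in range(len(square_wave) - consecutive_ones, len(square_wave)):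
--             filtered_wave[j] = 0
--     return filtered_wave
-- ===== SOURCE B (Python) =====
-- def filter_square_wave2(square_wave):
--     # Run-based rewrite: find each maximal run of nonzero samples and emit
--     # zeros for it when it is shorter than 20, instead of A's fused
--     # count-and-backfill scan.
--     out = []
--     n = len(square_wave)
--     i = 0
--     while i < n:
--         if square_wave[i] == 0:
--             out.append(square_wave[i])
--             i += 1
--         else:
--             j = i
--             while j < n and square_wave[j] != 0:
--                 j += 1
--             if j - i < 20:
--                 out.extend([0] * (j - i))
--             else:
--                 out.extend(square_wave[i:j])
--             i = j
--     return out
-- ===== Notes on version B (the rewrite author's own statement) =====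
-- stated objective: alternative
-- what changed: Replaces A's fused scan that counts consecutive nonzeros and back-fills zeros into a mutated copy with a run-based pass that locates each maximal nonzero run and emits zeros or the run wholesale while building the output front-to-back.
import Mathlib
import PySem

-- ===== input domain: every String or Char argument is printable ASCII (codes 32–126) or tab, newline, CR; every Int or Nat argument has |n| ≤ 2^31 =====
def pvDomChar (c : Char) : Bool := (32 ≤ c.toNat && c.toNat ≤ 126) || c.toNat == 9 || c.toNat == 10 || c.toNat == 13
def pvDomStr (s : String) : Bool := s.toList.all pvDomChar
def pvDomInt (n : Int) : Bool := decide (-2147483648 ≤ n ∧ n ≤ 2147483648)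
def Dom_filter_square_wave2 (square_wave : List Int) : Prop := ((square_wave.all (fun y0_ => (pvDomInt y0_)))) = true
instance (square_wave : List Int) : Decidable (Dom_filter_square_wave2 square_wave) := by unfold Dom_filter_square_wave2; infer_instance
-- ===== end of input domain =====

-- B replaces A's fused count-and-backfill scan with an explicit run-finding pass
-- that builds the output front-to-back (objective: alternative decomposition).

-- ===== PORT A =====
-- filtered_wave[j] = 0 for j in range(a, b): indices are always in range and
-- nonnegative here, so List.set j.toNat is exact.
def aZero (f : List Int) (a b : Int) : List Int :=
  (PySem.List.pyRange a b 1).foldl (fun g j => g.set j.toNat 0) f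

-- the for-loop of A as the obvious structural recursion over (i, val) with
-- state (filtered_wave, consecutive_ones)
def aLoop : List Int → Int → List Int → Int → List Int × Int
  | [], _, filtered, c => (filtered, c)
  | val :: rest, i, filtered, c =>
    if val = 0 then
      aLoop rest (i + 1) (if 0 < c ∧ c < 20 then aZero filtered (i - c) i else filtered) 0
    else
      aLoop rest (i + 1) filtered (c + 1)

def filter_square_wave2 (square_wave : List Int) : List Int :=
  let st := aLoop square_wave 0 square_wave 0
  if 0 < st.2 ∧ st.2 < 20 then
    aZero st.1 ((square_wave.length : Int) - st.2) (square_wave.length : Int)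
  else st.1

-- ===== PORT B =====
-- outer while loop of Source B as structural recursion on the remaining suffix;
-- the inner index scan j = first zero at/after i becomes takeWhile/dropWhile
def altGo : List Int → List Int
  | [] => []
  | x :: xs =>
    if x = 0 then x :: altGo xs
    else
      let run := (x :: xs).takeWhile (fun v => v != 0)
      (if (run.length : Int) < 20 then List.replicate run.length 0 else run)
        ++ altGo ((x :: xs).dropWhile (fun v => v != 0))
termination_by l => l.length
decreasing_by
  · simp
  · have hx : ((x :: xs).dropWhile (fun v => v != 0)) = xs.dropWhile (fun v => v != 0) := by
      simp only [List.dropWhile_cons]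
      simp [*]
    rw [hx]
    exact Nat.lt_succ_of_le (List.length_dropWhile_le _ _)

def filter_square_wave2_alt (square_wave : List Int) : List Int :=
  altGo square_wave

-- ===== PRECONDITION & SPEC =====
def Spec_filter_square_wave2 (square_wave : List Int) (out : List Int) : Prop := out = filter_square_wave2_alt square_wave
instance (square_wave : List Int) (out : List Int) : Decidable (Spec_filter_square_wave2 square_wave out) := by unfold Spec_filter_square_wave2; infer_instance

-- ===== CLAIM (what is proved, stated in full; the proofs are below) =====
def Claim_equal_filter_square_wave2 : Prop := ∀ (square_wave : List Int), Dom_filter_square_wave2 square_wave → Spec_filter_square_wave2 square_wave (filter_square_wave2 square_wave)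

-- ===== LEMMAS AND PROOFS =====

-- the trailing fix-up of A, as a function of the loop's final state and len(square_wave)
def fin (st : List Int × Int) (n : Int) : List Int :=
  if 0 < st.2 ∧ st.2 < 20 then aZero st.1 (n - st.2) n else st.1

lemma filter_eq_fin (w : List Int) :
    filter_square_wave2 w = fin (aLoop w 0 w 0) (w.length : Int) := rfl

-- zeroing the index range [p.length, p.length + r.length) of p ++ r ++ s
lemma aZero_mid : ∀ (r p s : List Int),
    aZero (p ++ (r ++ s)) (p.length : Int) ((p.length : Int) + (r.length : Int))
      = p ++ (List.replicate r.length 0 ++ s) := by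
  intro r
  induction r with
  | nil =>
      intro p s
      simp [aZero, PySem.List.pyRange_one_eq_nil (le_refl _)]
  | cons y r' ih =>
      intro p s
      have hlt : (p.length : Int) < (p.length : Int) + ((y :: r').length : Int) := by
        simp
      rw [aZero, PySem.List.pyRange_one_cons hlt]
      simp only [List.foldl_cons]
      have hset : (p ++ (y :: (r' ++ s))).set ((p.length : Int)).toNat 0
          = (p ++ [0]) ++ (r' ++ s) := by
        rw [Int.toNat_natCast, List.set_append_right _ _ (le_refl _)]
        simp
      have harg : ((p.length : Int) + 1) = (((p ++ [0]).length : Nat) : Int) := by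
        simp
      have hend : (p.length : Int) + ((y :: r').length : Int)
          = (((p ++ [0]).length : Nat) : Int) + ((r'.length : Nat) : Int) := by
        simp; omega
      calc (PySem.List.pyRange ((p.length : Int) + 1) ((p.length : Int) + ((y :: r').length : Int)) 1).foldl
              (fun g j => g.set j.toNat 0) ((p ++ (y :: (r' ++ s))).set ((p.length : Int)).toNat 0)
          = aZero ((p ++ [0]) ++ (r' ++ s)) (((p ++ [0]).length : Nat) : Int)
              ((((p ++ [0]).length : Nat) : Int) + ((r'.length : Nat) : Int)) := by
            rw [hset, harg, hend]; rfl
        _ = (p ++ [0]) ++ (List.replicate r'.length 0 ++ s) := ih (p ++ [0]) s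
        _ = p ++ (List.replicate (y :: r').length 0 ++ s) := by
            simp [List.replicate_succ]

lemma takeWhile_run (r v : List Int) (hr : ∀ x ∈ r, x ≠ 0)
    (hv : v = [] ∨ ∃ v', v = 0 :: v') :
    (r ++ v).takeWhile (fun x => x != 0) = r ∧
    (r ++ v).dropWhile (fun x => x != 0) = v := by
  constructor
  · rw [List.takeWhile_append]
    rcases hv with h | ⟨v', h⟩ <;> subst h <;> simp_all
  · rw [List.dropWhile_append]
    rcases hv with h | ⟨v', h⟩ <;> subst h <;> simp_all

lemma altGo_nil : altGo [] = [] := by rw [altGo.eq_def]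

lemma altGo_zero_cons (v : List Int) : altGo (0 :: v) = 0 :: altGo v := by
  rw [altGo.eq_def]; simp

lemma altGo_run (r v : List Int) (hne : r ≠ []) (hr : ∀ x ∈ r, x ≠ 0)
    (hv : v = [] ∨ ∃ v', v = 0 :: v') :
    altGo (r ++ v)
      = (if (r.length : Int) < 20 then List.replicate r.length 0 else r) ++ altGo v := by
  obtain ⟨y, r', rfl⟩ := List.exists_cons_of_ne_nil hne
  have hy : y ≠ 0 := hr y (by simp)
  obtain ⟨ht, hd⟩ := takeWhile_run (y :: r') v hr hv
  rw [List.cons_append, altGo.eq_def]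
  simp only [if_neg hy, ← List.cons_append, ht, hd]

-- the "handled" form of a pending run, shared by both programs
lemma handled_eq (r : List Int) (hne : r ≠ []) :
    (if 0 < (r.length : Int) ∧ (r.length : Int) < 20 then List.replicate r.length 0 else r)
      = (if (r.length : Int) < 20 then List.replicate r.length 0 else r) := by
  have : r.length ≠ 0 := by simpa using hne
  by_cases h20 : (r.length : Int) < 20
  · rw [if_pos ⟨by omega, h20⟩, if_pos h20]
  · rw [if_neg (fun hc => h20 hc.2), if_neg h20]

-- main invariant: processed prefix is p ++ r, r the pending maximal nonzero run
lemma aLoop_fin : ∀ (v p r : List Int), (∀ x ∈ r, x ≠ 0) →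
    fin (aLoop v ((p.length : Int) + (r.length : Int)) (p ++ (r ++ v)) ((r.length : Int)))
        ((p.length : Int) + (r.length : Int) + (v.length : Int))
      = p ++ altGo (r ++ v) := by
  intro v
  induction v with
  | nil =>
      intro p r hr
      by_cases hne : r = []
      · subst hne
        simp [aLoop, fin, altGo_nil]
      · have hrun : altGo (r ++ []) =
            (if (r.length : Int) < 20 then List.replicate r.length 0 else r) ++ altGo [] :=
          altGo_run r [] hne hr (Or.inl rfl)
        simp only [aLoop, fin]
        rw [← handled_eq r hne] at hrun
        by_cases hcond : 0 < (r.length : Int) ∧ (r.length : Int) < 20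
        · rw [if_pos hcond, hrun, if_pos hcond]
          have e1 : (p.length : Int) + (r.length : Int) + (([] : List Int).length : Int) - (r.length : Int)
              = (p.length : Int) := by simp
          have e2 : (p.length : Int) + (r.length : Int) + (([] : List Int).length : Int)
              = (p.length : Int) + (r.length : Int) := by simp
          rw [e1, e2, aZero_mid r p []]
          simp [altGo_nil]
        · rw [if_neg hcond, hrun, if_neg hcond]
          simp [altGo_nil]
  | cons x v' ih =>
      intro p r hr
      by_cases hx : x = 0
      · subst hx
        -- a zero closes the pending run
        set q : List Int :=
          (if 0 < (r.length : Int) ∧ (r.length : Int) < 20 then List.replicate r.length 0 else r)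
          with hqdef
        have hqlen : q.length = r.length := by
          rw [hqdef]; split <;> simp
        have hq : altGo (r ++ 0 :: v') = q ++ 0 :: altGo v' := by
          by_cases hne : r = []
          · subst hne
            have : q = [] := by rw [hqdef]; simp
            rw [this]
            simp [altGo_zero_cons]
          · rw [altGo_run r (0 :: v') hne hr (Or.inr ⟨v', rfl⟩), ← handled_eq r hne, ← hqdef,
              altGo_zero_cons]
        have hstep :
            (if 0 < ((r.length : Nat) : Int) ∧ ((r.length : Nat) : Int) < 20 then
               aZero (p ++ (r ++ 0 :: v'))
                 ((p.length : Int) + (r.length : Int) - (r.length : Int))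
                 ((p.length : Int) + (r.length : Int))
             else p ++ (r ++ 0 :: v'))
            = p ++ (q ++ 0 :: v') := by
          rw [hqdef]
          split
          · have e : (p.length : Int) + (r.length : Int) - (r.length : Int) = (p.length : Int) := by
              ring
            rw [e, aZero_mid r p (0 :: v')]
          · rfl
        simp only [aLoop, if_true]
        rw [hstep, hq]
        have key := ih (p ++ q ++ [0]) [] (by simp)
        simp only [List.nil_append, List.length_nil, Nat.cast_zero, add_zero] at key
        calc fin (aLoop v' ((p.length : Int) + (r.length : Int) + 1) (p ++ (q ++ 0 :: v')) 0)
                ((p.length : Int) + (r.length : Int) + (((0 : Int) :: v').length : Int))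
            = fin (aLoop v' (((p ++ q ++ [0]).length : Nat) : Int) ((p ++ q ++ [0]) ++ v') 0)
                ((((p ++ q ++ [0]).length : Nat) : Int) + (v'.length : Int)) := by
              have e1 : (p.length : Int) + (r.length : Int) + 1
                  = (((p ++ q ++ [0]).length : Nat) : Int) := by
                simp [hqlen]; ring
              have e2 : p ++ (q ++ 0 :: v') = (p ++ q ++ [0]) ++ v' := by simp
              have e3 : (p.length : Int) + (r.length : Int) + (((0 : Int) :: v').length : Int)
                  = (((p ++ q ++ [0]).length : Nat) : Int) + (v'.length : Int) := by
                simp [hqlen]; ring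
              rw [e1, e2, e3]
          _ = (p ++ q ++ [0]) ++ altGo v' := key
          _ = p ++ (q ++ 0 :: altGo v') := by simp
      · -- a nonzero extends the pending run
        simp only [aLoop, if_neg hx]
        have hr' : ∀ z ∈ r ++ [x], z ≠ 0 := by
          intro z hz
          rcases List.mem_append.mp hz with h | h
          · exact hr z h
          · simp at h; subst h; exact hx
        have key := ih p (r ++ [x]) hr'
        calc fin (aLoop v' ((p.length : Int) + (r.length : Int) + 1) (p ++ (r ++ x :: v'))
                ((r.length : Int) + 1))
                ((p.length : Int) + (r.length : Int) + (((x : Int) :: v').length : Int))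
            = fin (aLoop v' ((p.length : Int) + (((r ++ [x]).length : Nat) : Int))
                (p ++ ((r ++ [x]) ++ v')) (((r ++ [x]).length : Nat) : Int))
                ((p.length : Int) + (((r ++ [x]).length : Nat) : Int) + (v'.length : Int)) := by
              have e1 : (p.length : Int) + (r.length : Int) + 1
                  = (p.length : Int) + (((r ++ [x]).length : Nat) : Int) := by
                simp; ring
              have e2 : p ++ (r ++ x :: v') = p ++ ((r ++ [x]) ++ v') := by simp
              have e3 : ((r.length : Int)) + 1 = (((r ++ [x]).length : Nat) : Int) := by
                simp
              have e4 : (p.length : Int) + (r.length : Int) + (((x : Int) :: v').length : Int)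
                  = (p.length : Int) + (((r ++ [x]).length : Nat) : Int) + (v'.length : Int) := by
                simp; ring
              rw [e1, e2, e3, e4]
          _ = p ++ altGo ((r ++ [x]) ++ v') := key
          _ = p ++ altGo (r ++ x :: v') := by simp

-- ===== VERDICT (by name: the statement is the Claim_ definition above) =====
theorem filter_square_wave2_spec : Claim_equal_filter_square_wave2 := by
  intro w _
  unfold Spec_filter_square_wave2 filter_square_wave2_alt
  rw [filter_eq_fin]
  have := aLoop_fin w [] [] (by simp)
  simpa using this
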